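-- pv_equiv track=rewrite | github.com/Vaibhav-api-code/code-intelligence-toolkit | archive/replace_text_versions/replace_text.py | replace_exact
-- ===== SOURCE A (Python) =====
-- def replace_exact(content, old_text, new_text, count=-1):
--     """Replace exact text occurrences without recursive replacement."""
--     if old_text == new_text or old_text == "":
--         return content, 0
--
--     # Find all positions first (before any replacements)
--     positions = []
--     start = 0
--     while True:
--         pos = content.find(old_text, start)
--         if pos == -1:
--             break
--         positions.append(pos)
--         start = pos + len(old_text)
--
--     # Apply count limit if specified
--     if count != -1 and count < len(positions):
--         positions = positions[:count]
--
--     # If no positions found, return original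
--     if not positions:
--         return content, 0
--
--     # Build the result by reconstructing the string with replacements
--     # This avoids the recursive replacement issue entirely
--     result = []
--     last_end = 0
--
--     for pos in positions:
--         # Add the part before this match
--         result.append(content[last_end:pos])
--         # Add the replacement
--         result.append(new_text)
--         # Update position
--         last_end = pos + len(old_text)
--
--     # Add any remaining content after the last match
--     result.append(content[last_end:])
--
--     return ''.join(result), len(positions)
-- ===== SOURCE B (Python) =====
-- def replace_exact(content, old_text, new_text, count=-1):
--     """Replace exact text occurrences without recursive replacement."""
--     if old_text == new_text or old_text == "":
--         return content, 0
--     total = content.count(old_text)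
--     n = total if count < 0 else min(count, total)
--     return content.replace(old_text, new_text, n), n
-- ===== Notes on version B (the rewrite author's own statement) =====
-- stated objective: simpler
-- what changed: A scans for all match positions with repeated find, slices the position list to apply the count limit, and rebuilds the string piecewise with a list+join; B computes the occurrence count once via str.count, clamps the limit, and performs a single count-limited str.replace.
-- intended difference: On counts below -1 with at least one occurrence present, A's positions[:count] slice accidentally drops the last |count| matches (e.g. count=-2 replaces all but the last two), whereas B follows str.replace's convention that any negative count means replace all occurrences, which is the intended meaning of a negative limit. — e.g. on replace_exact("aa", "a", "b", -2): A returns ("aa", 0), B returns ("bb", 2)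
import Mathlib
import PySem

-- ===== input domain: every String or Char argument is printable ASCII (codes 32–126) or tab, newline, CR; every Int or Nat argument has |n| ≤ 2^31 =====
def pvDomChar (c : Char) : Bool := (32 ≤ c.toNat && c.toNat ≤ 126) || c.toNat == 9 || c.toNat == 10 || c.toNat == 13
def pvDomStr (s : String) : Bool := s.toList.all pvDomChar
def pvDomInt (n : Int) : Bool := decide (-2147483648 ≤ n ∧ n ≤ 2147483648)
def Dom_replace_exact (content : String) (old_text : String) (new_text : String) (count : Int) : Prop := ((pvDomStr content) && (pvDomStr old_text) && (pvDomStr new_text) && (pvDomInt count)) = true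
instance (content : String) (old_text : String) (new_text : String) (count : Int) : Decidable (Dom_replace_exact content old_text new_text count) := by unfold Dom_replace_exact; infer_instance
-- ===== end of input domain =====

-- B replaces A's explicit find-position scan plus list+join reconstruction by a single
-- count-limited left-to-right replace of str.count-many occurrences (simpler); on
-- counts below -1 B treats the negative limit as "replace all" where A drops the
-- last |count| matches (stated as the intended difference D_ below).

-- ===== PORT A =====
-- A's `while True: pos = content.find(old_text, start)` loop; the fuel argument
-- (content length + 1) only makes the loop total — Python's loop terminates because
-- old_text ≠ "" so start strictly increases.
def pvFindAll (content : String) (old_text : String) : Nat → Int → List Int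
  | 0, _ => []
  | fuel+1, start =>
    let pos := PySem.Str.findFrom content old_text start none
    if pos = -1 then []
    else pos :: pvFindAll content old_text fuel (pos + PySem.Str.len old_text)

def replace_exact (content : String) (old_text : String) (new_text : String) (count : Int) : String × Int :=
  if old_text == new_text || old_text == "" then (content, 0)
  else
    let positions := pvFindAll content old_text (content.toList.length + 1) 0
    let positions' := if count ≠ -1 ∧ count < (positions.length : Int)
                      then PySem.List.slice positions none (some count) else positions
    if positions' = [] then (content, 0)
    else
      let rl := positions'.foldl
        (fun (acc : List String × Int) pos =>
          (acc.1 ++ [PySem.Str.slice content (some acc.2) (some pos), new_text],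
           pos + PySem.Str.len old_text)) ([], 0)
      (PySem.Str.join "" (rl.1 ++ [PySem.Str.slice content (some rl.2) none]), (positions'.length : Int))

-- ===== PORT B =====
-- Hand port of CPython's count-limited str.replace(old, new, n) (PySem has no limited
-- replace): a left-to-right head scan replacing at most n non-overlapping occurrences;
-- exact for old ≠ "" (guaranteed by the guard in replace_exact_alt). Fuel = string length.
def pvRepN (old new : List Char) : Nat → List Char → Nat → List Char
  | 0, l, _ => l
  | _+1, [], _ => []
  | fuel+1, c :: t, n =>
    if n = 0 then c :: t
    else if old.isPrefixOf (c :: t) then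
      new ++ pvRepN old new fuel (List.drop old.length (c :: t)) (n - 1)
    else c :: pvRepN old new fuel t n

def replace_exact_alt (content : String) (old_text : String) (new_text : String) (count : Int) : String × Int :=
  if old_text == new_text || old_text == "" then (content, 0)
  else
    let total : Nat := PySem.Str.count content old_text
    let n : Nat := if count < 0 then total else min count.toNat total
    (String.ofList (pvRepN old_text.toList new_text.toList content.toList.length content.toList n), (n : Int))

-- ===== PRECONDITION & SPEC =====
-- On counts below -1 with an occurrence present, A's positions[:count] slice drops the
-- last |count| matches, while B follows str.replace's convention that a negative count
-- means replace all occurrences — the intended meaning of a negative limit.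
def D_replace_exact (content : String) (old_text : String) (new_text : String) (count : Int) : Prop :=
  old_text ≠ new_text ∧ old_text ≠ "" ∧ count < -1 ∧ old_text.toList <:+: content.toList
instance (content : String) (old_text : String) (new_text : String) (count : Int) : Decidable (D_replace_exact content old_text new_text count) := by unfold D_replace_exact; infer_instance

def Spec_replace_exact (content : String) (old_text : String) (new_text : String) (count : Int) (out : String × Int) : Prop := ¬ D_replace_exact content old_text new_text count → out = replace_exact_alt content old_text new_text count
instance (content : String) (old_text : String) (new_text : String) (count : Int) (out : String × Int) : Decidable (Spec_replace_exact content old_text new_text count out) := by unfold Spec_replace_exact; infer_instance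

def pvDiffWitness_replace_exact : String × String × String × Int := ("aa", "a", "b", -2)
def pvDiffWitnessOut_replace_exact : (String × Int) × (String × Int) := (("aa", 0), ("bb", 2))

-- ===== CLAIM (what is proved, stated in full; the proofs are below) =====
def Claim_unchanged_replace_exact : Prop := ∀ (content : String) (old_text : String) (new_text : String) (count : Int), Dom_replace_exact content old_text new_text count → Spec_replace_exact content old_text new_text count (replace_exact content old_text new_text count)
def Claim_changed_replace_exact : Prop := Dom_replace_exact (pvDiffWitness_replace_exact.1) (pvDiffWitness_replace_exact.2.1) (pvDiffWitness_replace_exact.2.2.1) (pvDiffWitness_replace_exact.2.2.2) ∧ D_replace_exact (pvDiffWitness_replace_exact.1) (pvDiffWitness_replace_exact.2.1) (pvDiffWitness_replace_exact.2.2.1) (pvDiffWitness_replace_exact.2.2.2) ∧ replace_exact (pvDiffWitness_replace_exact.1) (pvDiffWitness_replace_exact.2.1) (pvDiffWitness_replace_exact.2.2.1) (pvDiffWitness_replace_exact.2.2.2) = pvDiffWitnessOut_replace_exact.1 ∧ replace_exact_alt (pvDiffWitness_replace_exact.1) (pvDiffWitness_replace_exact.2.1) (pvDiffWitness_replace_exact.2.2.1)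 (pvDiffWitness_replace_exact.2.2.2) = pvDiffWitnessOut_replace_exact.2 ∧ pvDiffWitnessOut_replace_exact.1 ≠ pvDiffWitnessOut_replace_exact.2
def Claim_exact_replace_exact : Prop := ∀ (content : String) (old_text : String) (new_text : String) (count : Int), Dom_replace_exact content old_text new_text count → D_replace_exact content old_text new_text count → replace_exact content old_text new_text count ≠ replace_exact_alt content old_text new_text count

-- ===== LEMMAS AND PROOFS =====

-- ''.join with empty separator is flatten
theorem pv_join_nil (xss : List (List Char)) : PySem.Chars.join [] xss = xss.flatten := by
  induction xss with
  | nil => rfl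
  | cons x xs ih =>
    cases xs with
    | nil => simp [PySem.Chars.join, List.intercalate]
    | cons y ys =>
      simp only [PySem.Chars.join, List.intercalate, List.intersperse] at *
      simp_all

-- pvRepN with n = 0 is the identity
theorem pvRepN_zero (o nw : List Char) (fuel : Nat) (s : List Char) :
    pvRepN o nw fuel s 0 = s := by
  cases fuel with
  | zero => rfl
  | succ f => cases s <;> simp [pvRepN]

-- fuel irrelevance for pvRepN (old nonempty)
theorem pvRepN_fuel (o nw : List Char) (ho : o ≠ []) :
    ∀ (fuel fuel' : Nat) (s : List Char) (n : Nat), s.length ≤ fuel → s.length ≤ fuel' →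
      pvRepN o nw fuel s n = pvRepN o nw fuel' s n := by
  have hol : 0 < o.length := List.length_pos_iff.mpr ho
  intro fuel
  induction fuel with
  | zero =>
    intro fuel' s n hf hf'
    have hs : s = [] := List.eq_nil_of_length_eq_zero (Nat.le_zero.mp hf)
    subst hs
    cases fuel' <;> simp [pvRepN]
  | succ f ih =>
    intro fuel' s n hf hf'
    cases s with
    | nil => cases fuel' <;> simp [pvRepN]
    | cons c t =>
      cases fuel' with
      | zero => simp at hf'
      | succ g =>
        simp only [pvRepN]
        by_cases hn : n = 0
        · simp [hn]
        · simp only [if_neg hn]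
          by_cases hpre : o.isPrefixOf (c :: t) = true
          · simp only [if_pos hpre]
            have h1 : (List.drop o.length (c :: t)).length ≤ f := by
              simp only [List.length_drop, List.length_cons] at *
              omega
            have h2 : (List.drop o.length (c :: t)).length ≤ g := by
              simp only [List.length_drop, List.length_cons] at *
              omega
            rw [ih g _ _ h1 h2]
          · simp only [if_neg hpre]
            have h1 : t.length ≤ f := by simp at hf; omega
            have h2 : t.length ≤ g := by simp at hf'; omega
            rw [ih g _ _ h1 h2]

-- no occurrence → pvRepN is the identity
theorem pvRepN_noocc (o nw : List Char) :
    ∀ (fuel : Nat) (s : List Char) (n : Nat), ¬ o <:+: s → pvRepN o nw fuel s n = s := by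
  intro fuel
  induction fuel with
  | zero => intro s n _; rfl
  | succ f ih =>
    intro s n hno
    cases s with
    | nil => rfl
    | cons c t =>
      simp only [pvRepN]
      by_cases hn : n = 0
      · simp [hn]
      · simp only [if_neg hn]
        have hpre : ¬ o.isPrefixOf (c :: t) = true := by
          intro h
          exact hno (List.IsPrefix.isInfix (List.isPrefixOf_iff_prefix.mp h))
        simp only [if_neg hpre]
        rw [ih t n (fun h => hno (List.IsInfix.trans h (List.suffix_cons c t).isInfix))]

-- skipping a prefix with no occurrence
theorem pvRepN_skip (o nw : List Char) :
    ∀ (m : Nat) (s : List Char) (n : Nat), m ≤ s.length →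
      (∀ j, j < m → ¬ o <+: s.drop j) →
      pvRepN o nw s.length s (n+1) = s.take m ++ pvRepN o nw (s.length - m) (s.drop m) (n+1) := by
  intro m
  induction m with
  | zero => intro s n _ _; simp
  | succ m ih =>
    intro s n hm hno
    cases s with
    | nil => simp at hm
    | cons c t =>
      have hpre : ¬ o.isPrefixOf (c :: t) = true := by
        intro h
        exact hno 0 (Nat.succ_pos m) (by simpa using List.isPrefixOf_iff_prefix.mp h)
      have : pvRepN o nw (c :: t).length (c :: t) (n+1) = c :: pvRepN o nw t.length t (n+1) := by
        simp only [List.length_cons, pvRepN, if_neg hpre]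
        simp
      rw [this, ih t n (by simpa using hm)
        (fun j hj => by simpa using hno (j+1) (by omega))]
      simp

-- an occurrence at the head gets replaced
theorem pvRepN_hit (o nw : List Char) (ho : o ≠ []) (s : List Char) (n : Nat)
    (hp : o <+: s) :
    pvRepN o nw s.length s (n+1) = nw ++ pvRepN o nw (s.length - o.length) (s.drop o.length) n := by
  have hol : 0 < o.length := List.length_pos_iff.mpr ho
  cases s with
  | nil =>
    exfalso
    have h := hp.length_le
    simp only [List.length_nil, Nat.le_zero] at h
    omega
  | cons c t =>
    have hpre : o.isPrefixOf (c :: t) = true := List.isPrefixOf_iff_prefix.mpr hp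
    have hstep : pvRepN o nw (c :: t).length (c :: t) (n+1)
        = nw ++ pvRepN o nw t.length (List.drop o.length (c :: t)) n := by
      simp only [List.length_cons, pvRepN, if_pos hpre]
      simp
    rw [hstep, pvRepN_fuel o nw ho t.length ((c :: t).length - o.length)
      (List.drop o.length (c :: t)) n (by simp; omega) (by simp)]

-- same three facts for PySem.Chars.count.go
theorem cnt_fuel (o : List Char) (ho : o ≠ []) :
    ∀ (fuel fuel' : Nat) (s : List Char) (acc : Nat), s.length ≤ fuel → s.length ≤ fuel' →
      PySem.Chars.count.go o fuel s acc = PySem.Chars.count.go o fuel' s acc := by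
  have hol : 0 < o.length := List.length_pos_iff.mpr ho
  intro fuel
  induction fuel with
  | zero =>
    intro fuel' s acc hf hf'
    have hs : s = [] := List.eq_nil_of_length_eq_zero (Nat.le_zero.mp hf)
    subst hs
    cases fuel' with
    | zero => rfl
    | succ g => rw [PySem.Chars.count.go, PySem.Chars.count.go] <;> simp
  | succ f ih =>
    intro fuel' s acc hf hf'
    cases s with
    | nil =>
      cases fuel' with
      | zero => rw [PySem.Chars.count.go, PySem.Chars.count.go] <;> simp
      | succ g => rw [PySem.Chars.count.go, PySem.Chars.count.go] <;> simp
    | cons c t =>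
      cases fuel' with
      | zero => simp at hf'
      | succ g =>
        rw [PySem.Chars.count.go, PySem.Chars.count.go]
        by_cases hpre : o.isPrefixOf (c :: t) = true
        · simp only [if_pos hpre]
          apply ih
          · simp only [List.length_drop, List.length_cons] at *; omega
          · simp only [List.length_drop, List.length_cons] at *; omega
        · simp only [if_neg hpre]
          apply ih
          · simp at hf; omega
          · simp at hf'; omega

theorem cnt_noocc (o : List Char) :
    ∀ (fuel : Nat) (s : List Char) (acc : Nat), ¬ o <:+: s →
      PySem.Chars.count.go o fuel s acc = acc := by
  intro fuel
  induction fuel with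
  | zero => intro s acc _; rw [PySem.Chars.count.go]
  | succ f ih =>
    intro s acc hno
    cases s with
    | nil => rw [PySem.Chars.count.go] <;> simp
    | cons c t =>
      rw [PySem.Chars.count.go]
      have hpre : ¬ o.isPrefixOf (c :: t) = true := by
        intro h
        exact hno (List.IsPrefix.isInfix (List.isPrefixOf_iff_prefix.mp h))
      simp only [if_neg hpre]
      exact ih t acc (fun h => hno (List.IsInfix.trans h (List.suffix_cons c t).isInfix))

theorem cnt_skip (o : List Char) :
    ∀ (m : Nat) (s : List Char) (acc : Nat), m ≤ s.length →
      (∀ j, j < m → ¬ o <+: s.drop j) →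
      PySem.Chars.count.go o s.length s acc = PySem.Chars.count.go o (s.length - m) (s.drop m) acc := by
  intro m
  induction m with
  | zero => intro s acc _ _; simp
  | succ m ih =>
    intro s acc hm hno
    cases s with
    | nil => simp at hm
    | cons c t =>
      have hpre : ¬ o.isPrefixOf (c :: t) = true := by
        intro h
        exact hno 0 (Nat.succ_pos m) (by simpa using List.isPrefixOf_iff_prefix.mp h)
      have hstep : PySem.Chars.count.go o (c :: t).length (c :: t) acc
          = PySem.Chars.count.go o t.length t acc := by
        simp only [List.length_cons]
        rw [PySem.Chars.count.go, if_neg hpre]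
      rw [hstep, ih t acc (by simpa using hm)
        (fun j hj => by simpa using hno (j+1) (by omega))]
      simp

theorem cnt_hit (o : List Char) (ho : o ≠ []) (s : List Char) (acc : Nat) (hp : o <+: s) :
    PySem.Chars.count.go o s.length s acc
      = PySem.Chars.count.go o (s.length - o.length) (s.drop o.length) (acc + 1) := by
  have hol : 0 < o.length := List.length_pos_iff.mpr ho
  cases s with
  | nil =>
    exfalso
    have h := hp.length_le
    simp only [List.length_nil, Nat.le_zero] at h
    omega
  | cons c t =>
    have hpre : o.isPrefixOf (c :: t) = true := List.isPrefixOf_iff_prefix.mpr hp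
    have hstep : PySem.Chars.count.go o (c :: t).length (c :: t) acc
        = PySem.Chars.count.go o t.length (List.drop o.length (c :: t)) (acc+1) := by
      simp only [List.length_cons]
      rw [PySem.Chars.count.go, if_pos hpre]
    rw [hstep, cnt_fuel o ho t.length ((c :: t).length - o.length)
      (List.drop o.length (c :: t)) (acc+1) (by simp; omega) (by simp)]

-- proof-side Nat version of A's find loop
def pvFindAllN (cs o : List Char) : Nat → Nat → List Nat
  | 0, _ => []
  | fuel+1, start =>
    let pos := PySem.Chars.findFrom cs o (start : Int)
    if pos = -1 then []
    else pos.toNat :: pvFindAllN cs o fuel (pos.toNat + o.length)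

-- A's reconstruction, as a recursion over the (Nat) positions
def pvBuild (cs nw : List Char) (olen : Nat) : Nat → List Nat → List Char
  | start, [] => cs.drop start
  | start, p :: ps => (cs.drop start).take (p - start) ++ nw ++ pvBuild cs nw olen (p + olen) ps

-- facts about a successful findFrom
theorem pv_ff (cs o : List Char) (ho : o ≠ []) (start : Nat) (hs : start ≤ cs.length)
    (h : PySem.Chars.findFrom cs o (start : Int) ≠ -1) :
    PySem.Chars.findFrom cs o (start : Int) = ((PySem.Chars.findFrom cs o (start : Int)).toNat : Int)
    ∧ start ≤ (PySem.Chars.findFrom cs o (start : Int)).toNat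
    ∧ (PySem.Chars.findFrom cs o (start : Int)).toNat + o.length ≤ cs.length
    ∧ o <+: cs.drop (PySem.Chars.findFrom cs o (start : Int)).toNat
    ∧ ∀ i, start ≤ i → i < (PySem.Chars.findFrom cs o (start : Int)).toNat → ¬ o <+: cs.drop i := by
  obtain ⟨h1, h2, h3⟩ := PySem.Chars.findFrom_natCast_spec cs o start hs h
  have hnn : (0 : Int) ≤ PySem.Chars.findFrom cs o (start : Int) := le_trans (by positivity) h1
  have hcast : PySem.Chars.findFrom cs o (start : Int)
      = ((PySem.Chars.findFrom cs o (start : Int)).toNat : Int) := (Int.toNat_of_nonneg hnn).symm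
  have hle : start ≤ (PySem.Chars.findFrom cs o (start : Int)).toNat := by omega
  have hol : 0 < o.length := List.length_pos_iff.mpr ho
  have hlen : o.length ≤ cs.length - (PySem.Chars.findFrom cs o (start : Int)).toNat := by
    have := h2.length_le
    simpa using this
  have hplen : (PySem.Chars.findFrom cs o (start : Int)).toNat + o.length ≤ cs.length := by
    omega
  exact ⟨hcast, hle, hplen, h2, h3⟩

theorem pvFindAll_cast (content old : String) (ho : old.toList ≠ []) :
    ∀ (fuel : Nat) (start : Nat), start ≤ content.toList.length →
      pvFindAll content old fuel (start : Int)
        = (pvFindAllN content.toList old.toList fuel start).map Int.ofNat := by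
  intro fuel
  induction fuel with
  | zero => intro start _; rfl
  | succ f ih =>
    intro start hs
    simp only [pvFindAll, pvFindAllN, PySem.Str.findFrom_eq]
    by_cases hneg : PySem.Chars.findFrom content.toList old.toList (start : Int) none = -1
    · simp [hneg]
    · obtain ⟨hcast, hle, hplen, hpre, hmin⟩ :=
        pv_ff content.toList old.toList ho start hs hneg
      simp only [if_neg hneg, List.map_cons]
      have hlen : PySem.Str.len old = (old.toList.length : Int) := by
        simp [PySem.Str.len]
      rw [hlen]
      have harg : PySem.Chars.findFrom content.toList old.toList (start : Int) + (old.toList.length : Int)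
          = (((PySem.Chars.findFrom content.toList old.toList (start : Int)).toNat + old.toList.length : Nat) : Int) := by
        rw [hcast]; push_cast; rfl
      rw [harg, ih _ hplen, hcast]
      rfl

-- the find loop yields no position exactly when old does not occur in content
theorem pvFindAllN_nil_iff (cs o : List Char) (fuel : Nat) :
    pvFindAllN cs o (fuel + 1) 0 = [] ↔ ¬ o <:+: cs := by
  have h := PySem.Chars.findFrom_natCast_eq_neg_one_iff cs o 0 (Nat.zero_le _)
  simp only [List.drop_zero] at h
  simp only [pvFindAllN]
  by_cases hneg : PySem.Chars.findFrom cs o ((0 : Nat) : Int) = -1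
  · rw [if_pos hneg]
    exact iff_of_true rfl (h.mp hneg)
  · rw [if_neg hneg]
    exact iff_of_false (by simp) (fun hno => hneg (h.mpr hno))

theorem pv_main (cs o nw : List Char) (ho : o ≠ []) :
    ∀ (fuel start : Nat), start ≤ cs.length → cs.length - start < fuel →
      ∀ k, pvBuild cs nw o.length start ((pvFindAllN cs o fuel start).take k)
        = pvRepN o nw (cs.length - start) (cs.drop start) k := by
  have hol : 0 < o.length := List.length_pos_iff.mpr ho
  intro fuel
  induction fuel with
  | zero => intro start hs hf; omega
  | succ f ih =>
    intro start hs hf k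
    simp only [pvFindAllN]
    by_cases hneg : PySem.Chars.findFrom cs o (start : Int) = -1
    · have hno : ¬ o <:+: cs.drop start :=
        (PySem.Chars.findFrom_natCast_eq_neg_one_iff cs o start hs).mp hneg
      simp only [if_pos hneg, List.take_nil, pvBuild]
      exact (pvRepN_noocc o nw _ _ k hno).symm
    · obtain ⟨hcast, hle, hplen, hpre, hmin⟩ := pv_ff cs o ho start hs hneg
      simp only [if_neg hneg]
      cases k with
      | zero => simp [pvBuild, pvRepN_zero]
      | succ k =>
        set p := (PySem.Chars.findFrom cs o (start : Int)).toNat with hp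
        simp only [List.take_succ_cons, pvBuild]
        have hsl : (cs.drop start).length = cs.length - start := List.length_drop ..
        have hskip : pvRepN o nw (cs.length - start) (cs.drop start) (k+1)
            = (cs.drop start).take (p - start)
              ++ pvRepN o nw ((cs.drop start).length - (p - start)) ((cs.drop start).drop (p - start)) (k+1) := by
          rw [← hsl]
          exact pvRepN_skip o nw (p - start) (cs.drop start) k (by omega)
            (fun j hj => by
              rw [List.drop_drop]
              simpa [Nat.add_comm] using hmin (start + j) (by omega) (by omega))
        have hdd : (cs.drop start).drop (p - start) = cs.drop p := by
          rw [List.drop_drop]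
          congr 1
          omega
        have hll : (cs.drop start).length - (p - start) = (cs.drop p).length := by
          simp only [List.length_drop]
          omega
        have hhit : pvRepN o nw (cs.drop p).length (cs.drop p) (k+1)
            = nw ++ pvRepN o nw ((cs.drop p).length - o.length) ((cs.drop p).drop o.length) k :=
          pvRepN_hit o nw ho (cs.drop p) k hpre
        have hdd2 : (cs.drop p).drop o.length = cs.drop (p + o.length) := by
          rw [List.drop_drop]
        have hll2 : (cs.drop p).length - o.length = cs.length - (p + o.length) := by
          simp only [List.length_drop]
          omega
        rw [hskip, hdd, hll, hhit, hdd2, hll2,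
          ← ih (p + o.length) hplen (by omega) k, List.append_assoc]

theorem pv_cnt (cs o : List Char) (ho : o ≠ []) :
    ∀ (fuel start : Nat) (acc : Nat), start ≤ cs.length → cs.length - start < fuel →
      PySem.Chars.count.go o (cs.length - start) (cs.drop start) acc
        = acc + (pvFindAllN cs o fuel start).length := by
  have hol : 0 < o.length := List.length_pos_iff.mpr ho
  intro fuel
  induction fuel with
  | zero => intro start acc hs hf; omega
  | succ f ih =>
    intro start acc hs hf
    simp only [pvFindAllN]
    by_cases hneg : PySem.Chars.findFrom cs o (start : Int) = -1
    · have hno : ¬ o <:+: cs.drop start :=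
        (PySem.Chars.findFrom_natCast_eq_neg_one_iff cs o start hs).mp hneg
      simp only [if_pos hneg, List.length_nil, Nat.add_zero]
      exact cnt_noocc o _ _ acc hno
    · obtain ⟨hcast, hle, hplen, hpre, hmin⟩ := pv_ff cs o ho start hs hneg
      simp only [if_neg hneg, List.length_cons]
      set p := (PySem.Chars.findFrom cs o (start : Int)).toNat with hp
      have hsl : (cs.drop start).length = cs.length - start := List.length_drop ..
      have hskip : PySem.Chars.count.go o (cs.length - start) (cs.drop start) acc
          = PySem.Chars.count.go o ((cs.drop start).length - (p - start)) ((cs.drop start).drop (p - start)) acc := by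
        rw [← hsl]
        exact cnt_skip o (p - start) (cs.drop start) acc (by omega)
          (fun j hj => by
            rw [List.drop_drop]
            simpa [Nat.add_comm] using hmin (start + j) (by omega) (by omega))
      have hdd : (cs.drop start).drop (p - start) = cs.drop p := by
        rw [List.drop_drop]
        congr 1
        omega
      have hll : (cs.drop start).length - (p - start) = (cs.drop p).length := by
        simp only [List.length_drop]; omega
      have hhit : PySem.Chars.count.go o (cs.drop p).length (cs.drop p) acc
          = PySem.Chars.count.go o ((cs.drop p).length - o.length) ((cs.drop p).drop o.length) (acc + 1) :=
        cnt_hit o ho (cs.drop p) acc hpre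
      have hdd2 : (cs.drop p).drop o.length = cs.drop (p + o.length) := by
        rw [List.drop_drop]
      have hll2 : (cs.drop p).length - o.length = cs.length - (p + o.length) := by
        simp only [List.length_drop]; omega
      rw [hskip, hdd, hll, hhit, hdd2, hll2, ih (p + o.length) (acc + 1) hplen (by omega)]
      omega

theorem pv_foldjoin (content old new : String) :
    ∀ (ps : List Nat) (acc : List String) (last : Nat),
      (PySem.Str.join "" ((List.foldl
          (fun (acc : List String × Int) pos =>
            (acc.1 ++ [PySem.Str.slice content (some acc.2) (some pos), new],
             pos + PySem.Str.len old)) (acc, (last : Int)) (ps.map Int.ofNat)).1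
        ++ [PySem.Str.slice content
              (some (List.foldl
                (fun (acc : List String × Int) pos =>
                  (acc.1 ++ [PySem.Str.slice content (some acc.2) (some pos), new],
                   pos + PySem.Str.len old)) (acc, (last : Int)) (ps.map Int.ofNat)).2)
              none])).toList
      = (acc.map String.toList).flatten
        ++ pvBuild content.toList new.toList old.toList.length last ps := by
  intro ps
  induction ps with
  | nil =>
    intro acc last
    simp only [List.map_nil, List.foldl_nil, PySem.Str.toList_join, List.map_append,
      List.map_cons, List.map_nil, PySem.Str.toList_slice, pvBuild]
    rw [PySem.Chars.slice_eq_listSlice, PySem.List.slice_from_natCast,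
      show ("".toList : List Char) = [] from rfl, pv_join_nil]
    simp
  | cons p ps ih =>
    intro acc last
    simp only [List.map_cons, List.foldl_cons]
    have hlen : PySem.Str.len old = (old.toList.length : Int) := by simp [PySem.Str.len]
    have harg : Int.ofNat p + PySem.Str.len old = ((p + old.toList.length : Nat) : Int) := by
      rw [hlen]; push_cast; rfl
    rw [harg]
    have hIH := ih (acc ++ [PySem.Str.slice content (some (last : Int)) (some (Int.ofNat p)), new])
      (p + old.toList.length)
    rw [show (Int.ofNat p) = ((p : Nat) : Int) from rfl] at *
    rw [hIH]
    simp only [List.map_append, List.flatten_append, List.map_cons, List.map_nil,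
      List.flatten_cons, List.flatten_nil, PySem.Str.toList_slice, pvBuild]
    rw [PySem.Chars.slice_eq_listSlice, PySem.List.slice_natCast]
    simp [List.append_assoc]

-- ===== VERDICT (by name: the statement is the Claim_ definition above) =====
theorem replace_exact_spec : Claim_unchanged_replace_exact := by
  intro content old new count _
  unfold Spec_replace_exact
  intro hnd
  by_cases hguard : (old == new || old == "") = true
  · unfold replace_exact replace_exact_alt
    simp only [hguard, if_true]
  · have hne : old ≠ "" := by
      intro h
      subst h
      simp at hguard
    have hnn : old ≠ new := by
      intro h
      subst h
      simp at hguard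
    have ho : old.toList ≠ [] := by
      intro hn
      exact hne (String.toList_inj.mp (by simpa using hn))
    have hol : 0 < old.toList.length := List.length_pos_iff.mpr ho
    unfold replace_exact replace_exact_alt
    simp only [hguard, if_false, Bool.false_eq_true]
    set cs := content.toList with hcs
    set o := old.toList with hoo
    set P := pvFindAllN cs o (cs.length + 1) 0 with hP
    have hcast : pvFindAll content old (cs.length + 1) 0 = P.map Int.ofNat := by
      have := pvFindAll_cast content old ho (cs.length + 1) 0 (Nat.zero_le _)
      simpa using this
    have htot : PySem.Str.count content old = P.length := by
      rw [PySem.Str.count_eq, ← hcs, ← hoo]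
      have hie : o.isEmpty = false := by
        simpa [List.isEmpty_iff] using ho
      rw [PySem.Chars.count, hie]
      have := pv_cnt cs o ho (cs.length + 1) 0 0 (Nat.zero_le _) (by omega)
      simpa using this
    rw [hcast, htot]
    set n : Nat := if count < 0 then P.length else min count.toNat P.length with hn
    have hnle : n ≤ P.length := by
      rw [hn]
      split_ifs with h1
      · omega
      · exact Nat.min_le_right _ _
    have hpos : (if count ≠ -1 ∧ count < ((P.map Int.ofNat).length : Int)
            then PySem.List.slice (P.map Int.ofNat) none (some count)
            else P.map Int.ofNat) = (P.take n).map Int.ofNat := by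
      by_cases h1 : count = -1
      · rw [if_neg (by simp [h1]), hn, if_pos (by omega), List.take_length]
      · by_cases h2 : count < 0
        · -- count < -1: D_ forces no occurrence, so P = []
          have hP0 : P = [] := by
            rw [hP]
            apply (pvFindAllN_nil_iff cs o cs.length).mpr
            intro hocc
            exact hnd ⟨hnn, hne, by omega, hocc⟩
          have hk : count = -(((-count).toNat : Nat) : Int) := by omega
          have hkpos : 0 < (-count).toNat := by omega
          rw [hP0]
          rw [if_pos ⟨h1, by simp; omega⟩, hk, PySem.List.slice_to_neg_natCast _ _ hkpos]
          simp
        · by_cases h3 : count < ((P.length : Nat) : Int)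
          · rw [if_pos ⟨h1, by simpa using h3⟩, PySem.List.slice_to _ (by omega), ← List.map_take]
            congr 1
            rw [hn, if_neg h2]
            rw [Nat.min_eq_left (by omega)]
          · rw [if_neg (by simp; intro _; omega), hn, if_neg h2,
              Nat.min_eq_right (by omega), List.take_length]
    rw [hpos]
    by_cases hz : n = 0
    · rw [if_pos (by simp [hz]), hz]
      rw [Prod.mk.injEq]
      refine ⟨?_, by simp⟩
      apply String.toList_inj.mp
      rw [pvRepN_zero]
      simp [hcs]
    · have hPlen : P.length ≠ 0 := by omega
      have htk : (P.take n) ≠ [] := by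
        intro h
        have hlen0 := congrArg List.length h
        rw [List.length_take, List.length_nil] at hlen0
        rcases Nat.min_eq_zero_iff.mp hlen0 with h' | h' <;> omega
      rw [if_neg (by simpa using htk)]
      have hfj := pv_foldjoin content old new (P.take n) [] 0
      simp only [Nat.cast_zero, List.map_nil, List.flatten_nil, List.nil_append] at hfj
      have hmain := pv_main cs o new.toList ho (cs.length + 1) 0 (Nat.zero_le _) (by omega) n
      simp only [Nat.sub_zero, List.drop_zero] at hmain
      rw [Prod.mk.injEq]
      constructor
      · apply String.toList_inj.mp
        rw [hfj, ← hcs, ← hoo, hmain]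
        simp
      · simp only [List.length_map, List.length_take]
        rw [Nat.min_eq_left hnle]

theorem replace_exact_changed : Claim_changed_replace_exact := by
  unfold Claim_changed_replace_exact
  refine ⟨by decide, by decide, by decide, by decide, by decide⟩

theorem replace_exact_tight : Claim_exact_replace_exact := by
  intro content old new count _ hD
  obtain ⟨hnn, hne, hcnt, hocc⟩ := hD
  have ho : old.toList ≠ [] := by
    intro hn
    exact hne (String.toList_inj.mp (by simpa using hn))
  have hol : 0 < old.toList.length := List.length_pos_iff.mpr ho
  have hguard : (old == new || old == "") = false := by
    simp [hnn, hne]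
  unfold replace_exact replace_exact_alt
  simp only [hguard, if_false, Bool.false_eq_true]
  set cs := content.toList with hcs
  set o := old.toList with hoo
  set P := pvFindAllN cs o (cs.length + 1) 0 with hP
  have hcast : pvFindAll content old (cs.length + 1) 0 = P.map Int.ofNat := by
    have := pvFindAll_cast content old ho (cs.length + 1) 0 (Nat.zero_le _)
    simpa using this
  have htot : PySem.Str.count content old = P.length := by
    rw [PySem.Str.count_eq, ← hcs, ← hoo]
    have hie : o.isEmpty = false := by
      simpa [List.isEmpty_iff] using ho
    rw [PySem.Chars.count, hie]
    have := pv_cnt cs o ho (cs.length + 1) 0 0 (Nat.zero_le _) (by omega)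
    simpa using this
  have hPne : P ≠ [] := by
    intro h
    exact (pvFindAllN_nil_iff cs o cs.length).mp h hocc
  have hL1 : 1 ≤ P.length := List.length_pos_iff.mpr hPne
  rw [hcast, htot]
  -- A applies the slice: count ≠ -1 and count < length
  set m : Nat := (((P.length : Int)) + count).toNat with hm
  have hmlt : m < P.length := by
    rw [hm]; omega
  have hslice : (if count ≠ -1 ∧ count < ((P.map Int.ofNat).length : Int)
          then PySem.List.slice (P.map Int.ofNat) none (some count)
          else P.map Int.ofNat) = (P.take m).map Int.ofNat := by
    have hk : count = -(((-count).toNat : Nat) : Int) := by omega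
    have hkpos : 0 < (-count).toNat := by omega
    rw [if_pos ⟨by omega, by simp; omega⟩, hk, PySem.List.slice_to_neg_natCast _ _ hkpos,
      ← List.map_take]
    congr 2
    simp only [List.length_map]
    omega
  rw [hslice]
  -- B's replacement count: count < 0 so n = P.length
  rw [if_pos (by omega : count < 0)]
  intro heq
  have hsnd := congrArg Prod.snd heq
  by_cases hz : (P.take m).map Int.ofNat = []
  · rw [if_pos hz] at hsnd
    simp only at hsnd
    omega
  · rw [if_neg hz] at hsnd
    simp only [List.length_map, List.length_take] at hsnd
    have : min m P.length = m := Nat.min_eq_left (by omega)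
    rw [this] at hsnd
    have : m = P.length := by exact_mod_cast hsnd
    omega
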